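-- pv_equiv track=rewrite | github.com/ebonian/compprog | examples/grader/7/Password_Strength.py | key_pattern
-- ===== SOURCE A (Python) =====
-- def key_pattern(t):
--     key1='!@#$%^&*()_+_)(*&^%$#@!'
--     key2='qwertyuiopoiuytrewq'
--     key3='asdfghjklkjhgfdsa'
--     key4='zxcvbnmnbvcxz'
--     s=t.lower()
--     for i in range (len(t)-3):
--         chk=s[i:i+4]
--         if chk in key1 or chk in key2 or chk in key3 or chk in key4:
--             return True
--     return False
-- ===== SOURCE B (Python) =====
-- def _grams(s):
--     return {s[i:i+4] for i in range(len(s) - 3)}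
--
-- def key_pattern(t):
--     keys = ('!@#$%^&*()_+_)(*&^%$#@!', 'qwertyuiopoiuytrewq',
--             'asdfghjklkjhgfdsa', 'zxcvbnmnbvcxz')
--     pattern_grams = _grams(keys[0]) | _grams(keys[1]) | _grams(keys[2]) | _grams(keys[3])
--     return bool(pattern_grams & _grams(t.lower()))
-- ===== Notes on version B (the rewrite author's own statement) =====
-- stated objective: faster
-- what changed: B precomputes the set of all 4-grams of the four key strings and the set of all 4-grams of the lowercased password and returns whether their intersection is nonempty, instead of A's sliding-window scan that tests each window for substring containment in each of the four keys with an early return.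
import Mathlib
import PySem

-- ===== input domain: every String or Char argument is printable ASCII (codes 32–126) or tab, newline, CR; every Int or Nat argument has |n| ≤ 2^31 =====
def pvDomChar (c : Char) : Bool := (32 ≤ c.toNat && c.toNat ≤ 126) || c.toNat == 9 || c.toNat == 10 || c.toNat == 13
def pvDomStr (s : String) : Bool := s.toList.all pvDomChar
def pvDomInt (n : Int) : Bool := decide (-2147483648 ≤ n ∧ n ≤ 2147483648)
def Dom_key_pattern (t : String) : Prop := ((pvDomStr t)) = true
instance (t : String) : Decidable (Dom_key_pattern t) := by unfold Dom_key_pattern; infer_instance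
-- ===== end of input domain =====

-- B replaces A's sliding-window scan (substring test against each key, early return) by
-- intersecting the precomputed set of key 4-grams with the set of password 4-grams (objective: alternative).

-- ===== PORT A =====
-- the early-returning 'for i in range(len(t)-3)' loop of A
def keyALoop (key1 key2 key3 key4 s : List Char) : List Int → Bool
  | [] => false
  | i :: rest =>
    let chk := PySem.Chars.slice s (some i) (some (i + 4))
    if PySem.Chars.isIn chk key1 || PySem.Chars.isIn chk key2 ||
       PySem.Chars.isIn chk key3 || PySem.Chars.isIn chk key4 then true
    else keyALoop key1 key2 key3 key4 s rest

def key_pattern (t : String) : Bool :=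
  let key1 := "!@#$%^&*()_+_)(*&^%$#@!".toList
  let key2 := "qwertyuiopoiuytrewq".toList
  let key3 := "asdfghjklkjhgfdsa".toList
  let key4 := "zxcvbnmnbvcxz".toList
  let s := PySem.Chars.lower t.toList
  keyALoop key1 key2 key3 key4 s (PySem.List.pyRange 0 ((t.toList.length : Int) - 3) 1)

-- ===== PORT B =====
-- Source B's _grams: the set {s[i:i+4] for i in range(len(s)-3)}
def pvGrams (s : List Char) : PySem.Set (List Char) :=
  PySem.Set.ofList ((PySem.List.pyRange 0 ((s.length : Int) - 3) 1).map
    (fun i => PySem.Chars.slice s (some i) (some (i + 4))))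

def key_pattern_alt (t : String) : Bool :=
  let patternGrams :=
    (((pvGrams "!@#$%^&*()_+_)(*&^%$#@!".toList).union
      (pvGrams "qwertyuiopoiuytrewq".toList)).union
      (pvGrams "asdfghjklkjhgfdsa".toList)).union
      (pvGrams "zxcvbnmnbvcxz".toList)
  !(patternGrams.inter (pvGrams (PySem.Chars.lower t.toList))).isEmpty

-- ===== PRECONDITION & SPEC =====
def Spec_key_pattern (t : String) (out : Bool) : Prop := out = key_pattern_alt t
instance (t : String) (out : Bool) : Decidable (Spec_key_pattern t out) := by unfold Spec_key_pattern; infer_instance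

-- ===== CLAIM (what is proved, stated in full; the proofs are below) =====
def Claim_equal_key_pattern : Prop := ∀ (t : String), Dom_key_pattern t → Spec_key_pattern t (key_pattern t)

-- ===== LEMMAS AND PROOFS =====

lemma mem_range_iff (b i : Int) :
    i ∈ PySem.List.pyRange 0 b 1 ↔ 0 ≤ i ∧ i < b := by
  rw [PySem.List.mem_pyRange_iff_of_pos (by norm_num)]
  simp

lemma slice4_eq (s : List Char) (a : Nat) :
    PySem.List.slice s (some (a : Int)) (some ((a : Int) + 4)) = (s.drop a).take 4 := by
  have : ((a : Int) + 4) = ((a + 4 : Nat) : Int) := by push_cast; ring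
  rw [this, PySem.List.slice_natCast]
  congr 1
  omega

lemma slice4_length (s : List Char) (a : Nat) (h : a + 4 ≤ s.length) :
    (PySem.List.slice s (some (a : Int)) (some ((a : Int) + 4))).length = 4 := by
  rw [slice4_eq]
  simp
  omega

lemma mem_pvGrams_iff (c k : List Char) (hc : c.length = 4) :
    c ∈ pvGrams k ↔ c <:+: k := by
  unfold pvGrams
  rw [PySem.Set.mem_ofList, List.mem_map]
  constructor
  · rintro ⟨i, hi, rfl⟩
    rw [mem_range_iff] at hi
    obtain ⟨h0, hlt⟩ := hi
    obtain ⟨a, rfl⟩ := Int.eq_ofNat_of_zero_le h0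
    rw [PySem.Chars.slice_eq_listSlice, slice4_eq]
    exact (List.take_prefix 4 (k.drop a)).isInfix.trans (List.drop_suffix a k).isInfix
  · rintro ⟨pre, suf, hk⟩
    refine ⟨(pre.length : Int), ?_, ?_⟩
    · rw [mem_range_iff]
      have hlen : k.length = pre.length + 4 + suf.length := by
        rw [← hk]; simp [hc]; omega
      constructor
      · positivity
      · have hs4 : 4 + suf.length ≥ 4 := by omega
        omega
    · rw [PySem.Chars.slice_eq_listSlice, slice4_eq]
      have hdrop : k.drop pre.length = c ++ suf := by
        rw [← hk, List.append_assoc, List.drop_left]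
      rw [hdrop, ← hc, List.take_left]

lemma keyALoop_iff (k1 k2 k3 k4 s : List Char) (l : List Int) :
    keyALoop k1 k2 k3 k4 s l = true ↔
      ∃ i ∈ l,
        (PySem.Chars.isIn (PySem.Chars.slice s (some i) (some (i + 4))) k1 ||
         PySem.Chars.isIn (PySem.Chars.slice s (some i) (some (i + 4))) k2 ||
         PySem.Chars.isIn (PySem.Chars.slice s (some i) (some (i + 4))) k3 ||
         PySem.Chars.isIn (PySem.Chars.slice s (some i) (some (i + 4))) k4) = true := by
  induction l with
  | nil => simp [keyALoop]
  | cons i rest ih =>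
    simp only [keyALoop]
    split_ifs with h
    · simp only [true_iff]
      exact ⟨i, by simp, h⟩
    · rw [ih]
      constructor
      · rintro ⟨j, hj, hp⟩; exact ⟨j, by simp [hj], hp⟩
      · rintro ⟨j, hj, hp⟩
        rcases List.mem_cons.mp hj with rfl | hj'
        · exact absurd hp (by simpa using h)
        · exact ⟨j, hj', hp⟩

lemma pvNotEmptyIff {α : Type} (l : List α) :
    (!l.isEmpty) = true ↔ ∃ x, x ∈ l := by
  cases l <;> simp

theorem key_pattern_spec_aux (t : String) : key_pattern t = key_pattern_alt t := by
  rw [Bool.eq_iff_iff]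
  unfold key_pattern key_pattern_alt
  simp only []
  set s := PySem.Chars.lower t.toList with hs
  have hslen : s.length = t.toList.length := by simp [hs, PySem.Chars.lower]
  rw [keyALoop_iff, pvNotEmptyIff]
  constructor
  · rintro ⟨i, hi, hp⟩
    rw [mem_range_iff] at hi
    obtain ⟨h0, hlt⟩ := hi
    obtain ⟨a, rfl⟩ := Int.eq_ofNat_of_zero_le h0
    set chk := PySem.Chars.slice s (some (a : Int)) (some ((a : Int) + 4)) with hchk
    have hclen : chk.length = 4 := by
      rw [hchk, PySem.Chars.slice_eq_listSlice]
      exact slice4_length s a (by omega)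
    refine ⟨chk, PySem.Set.mem_inter .. |>.mpr ⟨?_, ?_⟩⟩
    · simp only [Bool.or_eq_true] at hp
      rcases hp with ((h1 | h2) | h3) | h4
      · exact (PySem.Set.mem_union ..).mpr (Or.inl ((PySem.Set.mem_union ..).mpr (Or.inl
          ((PySem.Set.mem_union ..).mpr (Or.inl
            ((mem_pvGrams_iff _ _ hclen).mpr ((PySem.Chars.isIn_iff_infix _ _).mp h1)))))))
      · exact (PySem.Set.mem_union ..).mpr (Or.inl ((PySem.Set.mem_union ..).mpr (Or.inl
          ((PySem.Set.mem_union ..).mpr (Or.inr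
            ((mem_pvGrams_iff _ _ hclen).mpr ((PySem.Chars.isIn_iff_infix _ _).mp h2)))))))
      · exact (PySem.Set.mem_union ..).mpr (Or.inl ((PySem.Set.mem_union ..).mpr (Or.inr
          ((mem_pvGrams_iff _ _ hclen).mpr ((PySem.Chars.isIn_iff_infix _ _).mp h3)))))
      · exact (PySem.Set.mem_union ..).mpr (Or.inr
          ((mem_pvGrams_iff _ _ hclen).mpr ((PySem.Chars.isIn_iff_infix _ _).mp h4)))
    · unfold pvGrams
      rw [PySem.Set.mem_ofList, List.mem_map]
      exact ⟨(a : Int), by rw [mem_range_iff]; constructor <;> omega, rfl⟩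
  · rintro ⟨g, hg⟩
    rw [PySem.Set.mem_inter] at hg
    obtain ⟨hgP, hgs⟩ := hg
    unfold pvGrams at hgs
    rw [PySem.Set.mem_ofList, List.mem_map] at hgs
    obtain ⟨i, hi, rfl⟩ := hgs
    rw [mem_range_iff] at hi
    obtain ⟨h0, hlt⟩ := hi
    obtain ⟨a, rfl⟩ := Int.eq_ofNat_of_zero_le h0
    set chk := PySem.Chars.slice s (some (a : Int)) (some ((a : Int) + 4)) with hchk
    have hclen : chk.length = 4 := by
      rw [hchk, PySem.Chars.slice_eq_listSlice]
      exact slice4_length s a (by omega)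
    refine ⟨(a : Int), by rw [mem_range_iff]; constructor <;> omega, ?_⟩
    simp only [Bool.or_eq_true]
    rw [PySem.Set.mem_union] at hgP
    rcases hgP with hgP | h4
    · rw [PySem.Set.mem_union] at hgP
      rcases hgP with hgP | h3
      · rw [PySem.Set.mem_union] at hgP
        rcases hgP with h1 | h2
        · exact Or.inl (Or.inl (Or.inl ((PySem.Chars.isIn_iff_infix _ _).mpr
            ((mem_pvGrams_iff _ _ hclen).mp h1))))
        · exact Or.inl (Or.inl (Or.inr ((PySem.Chars.isIn_iff_infix _ _).mpr
            ((mem_pvGrams_iff _ _ hclen).mp h2))))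
      · exact Or.inl (Or.inr ((PySem.Chars.isIn_iff_infix _ _).mpr
          ((mem_pvGrams_iff _ _ hclen).mp h3)))
    · exact Or.inr ((PySem.Chars.isIn_iff_infix _ _).mpr
        ((mem_pvGrams_iff _ _ hclen).mp h4))

-- ===== VERDICT (by name: the statement is the Claim_ definition above) =====
theorem key_pattern_spec : Claim_equal_key_pattern := by
  intro t _
  exact key_pattern_spec_aux t
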